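-- pv_equiv track=rewrite | github.com/coding-samu/Algo2 | divideEtImperaMethods.py | count_substring_that_starts_with_zero_and_ends_with_one
-- ===== SOURCE A (Python) =====
-- def count_substring_that_starts_with_zero_and_ends_with_one(S,i,j):
--     if i == j:
--         if S[i] == '0':
--             return (1,0,0)
--         return (0,1,0)
--     m = (i+j)//2
--     zs,us,ts = count_substring_that_starts_with_zero_and_ends_with_one(S,i,m)
--     zd,ud,td = count_substring_that_starts_with_zero_and_ends_with_one(S,m+1,j)
--     return zs+zd,us+ud,zs*ud+ts+td
-- ===== SOURCE B (Python) =====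
-- def count_substring_that_starts_with_zero_and_ends_with_one(S, i, j):
--     zeros = ones = triples = 0
--     k = i
--     while True:
--         if S[k] == '0':
--             zeros += 1
--         else:
--             ones += 1
--             triples += zeros
--         if k == j:
--             return (zeros, ones, triples)
--         k += 1
-- ===== Notes on version B (the rewrite author's own statement) =====
-- stated objective: simpler
-- what changed: Replaced the divide-and-conquer recursion (recombining halves with the cross term zs*ud) by a single left-to-right while-loop pass that keeps zeros/ones counters and adds the running zero count to the triple count at each non-'0' character; no recursion, no tuple recombination.
import Mathlib
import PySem

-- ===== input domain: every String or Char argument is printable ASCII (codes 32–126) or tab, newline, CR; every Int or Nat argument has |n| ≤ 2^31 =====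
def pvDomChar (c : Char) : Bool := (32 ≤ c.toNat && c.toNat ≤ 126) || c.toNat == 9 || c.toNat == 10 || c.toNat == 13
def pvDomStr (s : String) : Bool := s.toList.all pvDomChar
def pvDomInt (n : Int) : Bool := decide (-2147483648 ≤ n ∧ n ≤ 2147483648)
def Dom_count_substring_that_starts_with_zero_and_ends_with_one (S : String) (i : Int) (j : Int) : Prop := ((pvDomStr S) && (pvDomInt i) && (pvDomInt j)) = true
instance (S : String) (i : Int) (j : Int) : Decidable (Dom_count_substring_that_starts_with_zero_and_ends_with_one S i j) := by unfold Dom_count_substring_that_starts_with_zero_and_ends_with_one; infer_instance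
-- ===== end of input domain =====

-- B replaces A's divide-and-conquer recursion by a single counting pass over S[i..j] (objective: simpler).


-- ===== PORT A =====
-- Literal port of A's divide-and-conquer. Where Python raises we leave the claimed
-- domain: S[i] out of range (IndexError) gives the `none` arm, and i > j (infinite
-- recursion, RecursionError) gets a totality guard; Pre_ excludes both.
def count_substring_that_starts_with_zero_and_ends_with_one (S : String) (i : Int) (j : Int) : Int × Int × Int :=
  if i = j then
    match PySem.Str.pyGet? S i with
    | some c => if c = '0' then (1, 0, 0) else (0, 1, 0)
    | none => (0, 0, 0)       -- IndexError in Python; excluded by Pre_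
  else if _h : i < j then
    let m := PySem.Int.floordiv (i + j) 2
    let s := count_substring_that_starts_with_zero_and_ends_with_one S i m
    let d := count_substring_that_starts_with_zero_and_ends_with_one S (m + 1) j
    (s.1 + d.1, s.2.1 + d.2.1, s.1 * d.2.1 + s.2.2 + d.2.2)
  else (0, 0, 0)              -- i > j: Python recurses forever; excluded by Pre_
termination_by (j - i).toNat
decreasing_by
  · have h1 := PySem.Int.floordiv_two_mid_bounds (le_of_lt _h)
    have h2 : PySem.Int.floordiv (i + j) 2 < j := by
      rw [PySem.Int.floordiv_lt_iff_lt_mul (by omega)]; omega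
    omega
  · have h1 := PySem.Int.floordiv_two_mid_bounds (le_of_lt _h)
    omega

-- ===== PORT B =====
-- B-side helper: B's while-loop (state zeros/ones/triples; processes S[k], stops after k = j).
-- When Python's S[k] raises IndexError (pyGet? = none) the loop state is returned; Pre_ excludes those inputs.
def pvLoopB (S : String) (k j z u t : Int) : Int × Int × Int :=
  match hg : PySem.Str.pyGet? S k with
  | none => (z, u, t)         -- IndexError in Python; excluded by Pre_
  | some c =>
    let st := if c = '0' then (z + 1, u, t) else (z, u + 1, t + z)
    if k = j then st else pvLoopB S (k + 1) j st.1 st.2.1 st.2.2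
termination_by ((S.toList.length : Int) - k).toNat
decreasing_by
  have h' : PySem.List.pyGet? S.toList k = some c := by simpa [PySem.Str.pyGet?] using hg
  have hin : PySem.Raise.InRange S.toList.length k := by
    by_contra hn
    rw [← PySem.List.pyGet?_eq_none_iff] at hn
    rw [hn] at h'
    simp at h'
  have hlen : S.toList.length = S.length := by simp
  simp only [PySem.Raise.InRange] at hin
  omega

def count_substring_that_starts_with_zero_and_ends_with_one_alt (S : String) (i : Int) (j : Int) : Int × Int × Int :=
  pvLoopB S i j 0 0 0

-- ===== PRECONDITION & SPEC =====
-- Pre_ admits exactly the calls on which Python A returns: i ≤ j (otherwise A's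
-- recursion never reaches a base case: RecursionError) and every index k ∈ [i, j]
-- a valid Python index of S (otherwise IndexError at the leftmost bad leaf).
def Pre_count_substring_that_starts_with_zero_and_ends_with_one (S : String) (i : Int) (j : Int) : Prop :=
  i ≤ j ∧ -(S.toList.length : Int) ≤ i ∧ j < (S.toList.length : Int)
instance (S : String) (i : Int) (j : Int) : Decidable (Pre_count_substring_that_starts_with_zero_and_ends_with_one S i j) := by unfold Pre_count_substring_that_starts_with_zero_and_ends_with_one; infer_instance
def pvWitness_count_substring_that_starts_with_zero_and_ends_with_one : String × Int × Int := ("0101", 0, 3)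

def Spec_count_substring_that_starts_with_zero_and_ends_with_one (S : String) (i : Int) (j : Int) (out : Int × Int × Int) : Prop := out = count_substring_that_starts_with_zero_and_ends_with_one_alt S i j
instance (S : String) (i : Int) (j : Int) (out : Int × Int × Int) : Decidable (Spec_count_substring_that_starts_with_zero_and_ends_with_one S i j out) := by unfold Spec_count_substring_that_starts_with_zero_and_ends_with_one; infer_instance

-- ===== CLAIM (what is proved, stated in full; the proofs are below) =====
def Claim_equal_count_substring_that_starts_with_zero_and_ends_with_one : Prop := ∀ (S : String) (i : Int) (j : Int), Dom_count_substring_that_starts_with_zero_and_ends_with_one S i j → Pre_count_substring_that_starts_with_zero_and_ends_with_one S i j → Spec_count_substring_that_starts_with_zero_and_ends_with_one S i j (count_substring_that_starts_with_zero_and_ends_with_one S i j)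

-- ===== LEMMAS AND PROOFS =====

-- Proof-side view of one loop step as a fold step over the index list.
def pvStepB (S : String) (st : Int × Int × Int) (k : Int) : Int × Int × Int :=
  match PySem.Str.pyGet? S k with
  | some c => if c = '0' then (st.1 + 1, st.2.1, st.2.2)
              else (st.1, st.2.1 + 1, st.2.2 + st.1)
  | none => st

-- B's while-loop is the fold of pvStepB over the indices k, k+1, …, j (valid indices only).
theorem pvLoopB_eq_foldl (S : String) (k j z u t : Int) (hkj : k ≤ j)
    (hlo : -(S.toList.length : Int) ≤ k) (hhi : j < (S.toList.length : Int)) :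
    pvLoopB S k j z u t = (PySem.List.pyRange k (j + 1) 1).foldl (pvStepB S) (z, u, t) := by
  rw [pvLoopB]
  rcases hg : PySem.Str.pyGet? S k with _ | c
  · exfalso
    have h' : PySem.List.pyGet? S.toList k = none := by simpa [PySem.Str.pyGet?] using hg
    rw [PySem.List.pyGet?_eq_none_iff] at h'
    refine h' ?_
    have hlen : S.toList.length = S.length := by simp
    simp only [PySem.Raise.InRange]
    omega
  · have h' : PySem.List.pyGet? S.toList k = some c := by simpa [PySem.Str.pyGet?] using hg
    rw [PySem.List.pyRange_one_cons (by omega : k < j + 1), List.foldl_cons]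
    rcases eq_or_lt_of_le hkj with rfl | h
    · rw [PySem.List.pyRange_one_eq_nil (by omega : k + 1 ≥ k + 1)]
      by_cases hc : c = '0' <;> simp [pvStepB, h', hc]
    · have hrec := pvLoopB_eq_foldl S (k + 1) j
        (if c = '0' then z + 1 else z) (if c = '0' then u else u + 1) (if c = '0' then t else t + z)
        (by omega) (by omega) hhi
      by_cases hc : c = '0' <;> simp only [hc, ite_true, ite_false] at hrec ⊢ <;>
        simp [pvStepB, h', hc, if_neg (by omega : ¬ k = j), hrec]
termination_by (j - k).toNat
decreasing_by omega

-- One fold step from an arbitrary state, in terms of the step from the zero state.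
theorem pvFoldl_step_shift (S : String) (l : List Int) (z u t : Int) :
    l.foldl (pvStepB S) (z, u, t) =
      (z + (l.foldl (pvStepB S) ((0:Int), (0:Int), (0:Int))).1,
       u + (l.foldl (pvStepB S) ((0:Int), (0:Int), (0:Int))).2.1,
       t + (l.foldl (pvStepB S) ((0:Int), (0:Int), (0:Int))).2.2
         + z * (l.foldl (pvStepB S) ((0:Int), (0:Int), (0:Int))).2.1) := by
  induction l generalizing z u t with
  | nil => simp
  | cons k l ih =>
    simp only [List.foldl_cons]
    rcases h : PySem.Str.pyGet? S k with _ | c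
    · simp only [pvStepB, h]
      exact ih z u t
    · have h' : PySem.List.pyGet? S.toList k = some c := by simpa [PySem.Str.pyGet?] using h
      by_cases hc : c = '0'
      · have hs1 : pvStepB S (z, u, t) k = (z + 1, u, t) := by simp [pvStepB, h', hc]
        have hs0 : pvStepB S ((0:Int), (0:Int), (0:Int)) k = (1, 0, 0) := by simp [pvStepB, h', hc]
        rw [hs1, hs0, ih (z + 1) u t, ih 1 0 0]
        obtain ⟨Z, U, T⟩ := l.foldl (pvStepB S) ((0:Int), (0:Int), (0:Int))
        refine Prod.ext ?_ (Prod.ext ?_ ?_) <;> simp <;> ring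
      · have hs1 : pvStepB S (z, u, t) k = (z, u + 1, t + z) := by simp [pvStepB, h', hc]
        have hs0 : pvStepB S ((0:Int), (0:Int), (0:Int)) k = (0, 1, 0) := by simp [pvStepB, h', hc]
        rw [hs1, hs0, ih z (u + 1) (t + z), ih 0 1 0]
        obtain ⟨Z, U, T⟩ := l.foldl (pvStepB S) ((0:Int), (0:Int), (0:Int))
        refine Prod.ext ?_ (Prod.ext ?_ ?_) <;> simp <;> ring

theorem pvRange_split (a b c : Int) (hab : a ≤ b) (hbc : b ≤ c) :
    PySem.List.pyRange a c 1 = PySem.List.pyRange a b 1 ++ PySem.List.pyRange b c 1 := by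
  rcases eq_or_lt_of_le hab with rfl | h
  · rw [PySem.List.pyRange_one_eq_nil (le_refl a)]; simp
  · rw [PySem.List.pyRange_one_cons (by omega : a < c), PySem.List.pyRange_one_cons h,
        pvRange_split (a + 1) b c (by omega) hbc]
    simp
termination_by (b - a).toNat
decreasing_by omega

-- The fold over [i, j] combines like A's recursion across any split point m.
theorem pvFoldl_combine (S : String) (i m j : Int) (h1 : i ≤ m) (h2 : m < j) :
    (PySem.List.pyRange i (j + 1) 1).foldl (pvStepB S) ((0:Int), (0:Int), (0:Int)) =
      (((PySem.List.pyRange i (m + 1) 1).foldl (pvStepB S) ((0:Int), (0:Int), (0:Int))).1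
         + ((PySem.List.pyRange (m + 1) (j + 1) 1).foldl (pvStepB S) ((0:Int), (0:Int), (0:Int))).1,
       ((PySem.List.pyRange i (m + 1) 1).foldl (pvStepB S) ((0:Int), (0:Int), (0:Int))).2.1
         + ((PySem.List.pyRange (m + 1) (j + 1) 1).foldl (pvStepB S) ((0:Int), (0:Int), (0:Int))).2.1,
       ((PySem.List.pyRange i (m + 1) 1).foldl (pvStepB S) ((0:Int), (0:Int), (0:Int))).1
         * ((PySem.List.pyRange (m + 1) (j + 1) 1).foldl (pvStepB S) ((0:Int), (0:Int), (0:Int))).2.1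
         + ((PySem.List.pyRange i (m + 1) 1).foldl (pvStepB S) ((0:Int), (0:Int), (0:Int))).2.2
         + ((PySem.List.pyRange (m + 1) (j + 1) 1).foldl (pvStepB S) ((0:Int), (0:Int), (0:Int))).2.2) := by
  rw [pvRange_split i (m + 1) (j + 1) (by omega) (by omega), List.foldl_append]
  obtain ⟨Z, U, T⟩ := (PySem.List.pyRange i (m + 1) 1).foldl (pvStepB S) ((0:Int), (0:Int), (0:Int))
  rw [pvFoldl_step_shift]
  obtain ⟨Z', U', T'⟩ := (PySem.List.pyRange (m + 1) (j + 1) 1).foldl (pvStepB S) ((0:Int), (0:Int), (0:Int))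
  refine Prod.ext ?_ (Prod.ext ?_ ?_) <;> simp <;> ring

theorem pvA_eq_foldl (S : String) (i j : Int) (hij : i ≤ j)
    (hlo : -(S.toList.length : Int) ≤ i) (hhi : j < (S.toList.length : Int)) :
    count_substring_that_starts_with_zero_and_ends_with_one S i j =
      (PySem.List.pyRange i (j + 1) 1).foldl (pvStepB S) ((0:Int), (0:Int), (0:Int)) := by
  rcases eq_or_lt_of_le hij with rfl | h
  · rw [count_substring_that_starts_with_zero_and_ends_with_one]
    rw [PySem.List.pyRange_one_singleton]
    simp only [List.foldl_cons, List.foldl_nil, pvStepB]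
    rcases hg : PySem.Str.pyGet? S i with _ | c
    · exfalso
      rw [show PySem.Str.pyGet? S i = PySem.List.pyGet? S.toList i by
            simp [PySem.Str.pyGet?]] at hg
      rw [PySem.List.pyGet?_eq_none_iff] at hg
      refine hg ?_
      have hlen : S.toList.length = S.length := by simp
      simp only [PySem.Raise.InRange]
      omega
    · by_cases hc : c = '0' <;> simp [hc]
  · rw [count_substring_that_starts_with_zero_and_ends_with_one]
    have hb := PySem.Int.floordiv_two_mid_bounds (le_of_lt h)
    have hmj : PySem.Int.floordiv (i + j) 2 < j := by
      rw [PySem.Int.floordiv_lt_iff_lt_mul (by omega)]; omega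
    simp only [if_neg (by omega : ¬ i = j), dif_pos h]
    rw [pvA_eq_foldl S i (PySem.Int.floordiv (i + j) 2) (by omega) hlo (by omega),
        pvA_eq_foldl S (PySem.Int.floordiv (i + j) 2 + 1) j (by omega) (by omega) hhi,
        pvFoldl_combine S i (PySem.Int.floordiv (i + j) 2) j (by omega) hmj]
termination_by (j - i).toNat
decreasing_by all_goals omega

-- ===== VERDICT (by name: the statement is the Claim_ definition above) =====
theorem count_substring_that_starts_with_zero_and_ends_with_one_spec : Claim_equal_count_substring_that_starts_with_zero_and_ends_with_one := by
  intro S i j _hDom hPre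
  obtain ⟨h1, h2, h3⟩ := hPre
  unfold Spec_count_substring_that_starts_with_zero_and_ends_with_one
  unfold count_substring_that_starts_with_zero_and_ends_with_one_alt
  rw [pvA_eq_foldl S i j h1 h2 h3, pvLoopB_eq_foldl S i j 0 0 0 h1 h2 h3]
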